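-- pv_equiv track=rewrite | github.com/zainabzahara/Architectures-for-Artificial-Intelligence-Labs | APAI25-LAB09-NE16/parameters_generate.py | vector_initial_value
-- ===== SOURCE A (Python) =====
-- def vector_size(data):
--     if hasattr(data, 'numel'):
--         return data.numel()
--     elif hasattr(data, 'size'):
--         return data.size
--     else:
--         return len(data)
--
-- def vector_initial_value(data, elements_per_row=10, spaces=4):
--     indent = ' ' * spaces
--     size = vector_size(data)
--
--     if hasattr(data, 'flatten'):
--         data = data.flatten()
--
--     retval = ""
--     retval += " = {"
--     for i, element in enumerate(data):
--         if i % elements_per_row == 0: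
--             retval += '\n' + indent
--         retval += '{value:#04x}'.format(value=int(element))
--         if i < size - 1:
--             retval += ', '
--     retval += '\n}'
--     return retval
-- ===== SOURCE B (Python) =====
-- def vector_initial_value(data, elements_per_row=10, spaces=4):
--     indent = ' ' * spaces
--     if hasattr(data, 'flatten'):
--         data = data.flatten()
--     cells = ['{:#04x}'.format(int(e)) for e in data]
--     if not cells:
--         return ' = {\n}'
--     rows = []
--     for i, c in enumerate(cells):
--         if i % elements_per_row == 0:
--             rows.append([c])
--         else:
--             rows[-1].append(c)
--     body = (', \n' + indent).join(', '.join(r) for r in rows)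
--     return ' = {\n' + indent + body + '\n}'
-- ===== Notes on version B (the rewrite author's own statement) =====
-- stated objective: simpler
-- what changed: A streams characters one element at a time, deciding newline+indent by the index modulo and a trailing-comma test against the global size; B formats all cells once, groups them into rows, and joins rows/cells with str.join separators.
import Mathlib
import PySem

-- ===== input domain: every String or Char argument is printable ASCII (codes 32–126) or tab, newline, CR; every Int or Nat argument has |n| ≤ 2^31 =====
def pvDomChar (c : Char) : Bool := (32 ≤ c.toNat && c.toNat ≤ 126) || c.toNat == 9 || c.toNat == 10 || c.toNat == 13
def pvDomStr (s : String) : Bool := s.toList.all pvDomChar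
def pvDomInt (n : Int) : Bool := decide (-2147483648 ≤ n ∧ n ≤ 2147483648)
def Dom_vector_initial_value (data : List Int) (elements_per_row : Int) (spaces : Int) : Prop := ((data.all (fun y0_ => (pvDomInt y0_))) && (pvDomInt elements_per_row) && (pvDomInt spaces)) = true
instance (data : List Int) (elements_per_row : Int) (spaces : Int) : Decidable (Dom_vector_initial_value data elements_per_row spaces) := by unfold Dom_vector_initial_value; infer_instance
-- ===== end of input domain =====

-- B replaces A's streaming modulo-indexed character appends (with trailing-comma bookkeeping
-- against the global size) by a chunk-then-join structure: format all cells once, group them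
-- into rows, join each row with ', ' and the rows with ', \n'+indent.  Objective: simpler.

-- ===== PORT A =====
-- hand port of Python's '{value:#04x}'.format(value=n): '#' gives the '0x' prefix, zero-pad
-- to total width 4 (the zero padding goes between sign/prefix and digits); exact for all ints.
def pvHex04 (n : Int) : List Char :=
  if n < 0 then
    '-' :: '0' :: 'x' :: Nat.toDigits 16 (-n).toNat
  else
    let d := Nat.toDigits 16 n.toNat
    '0' :: 'x' :: (List.replicate (2 - d.length) '0' ++ d)

def vector_initial_value (data : List Int) (elements_per_row : Int) (spaces : Int) : String :=
  -- ' ' * spaces (a negative count gives the empty string, as Int.toNat clamps)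
  let indent : List Char := List.replicate spaces.toNat ' '
  let size := PySem.List.len data
  let body :=
    (PySem.List.enumerate data 0).foldl (fun retval p =>
      let r1 := if PySem.Int.mod p.1 elements_per_row = 0 then retval ++ '\n' :: indent else retval
      let r2 := r1 ++ pvHex04 p.2
      if p.1 < size - 1 then r2 ++ [',', ' '] else r2)
      (" = {".toList)
  String.ofList (body ++ ['\n', '}'])

-- ===== PORT B =====
def vector_initial_value_alt (data : List Int) (elements_per_row : Int) (spaces : Int) : String :=
  let indent : List Char := List.replicate spaces.toNat ' '
  let cells := data.map pvHex04
  if cells = [] then " = {\n}"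
  else
    let rows :=
      (PySem.List.enumerate cells 0).foldl (fun rows p =>
        if PySem.Int.mod p.1 elements_per_row = 0 then rows ++ [[p.2]]
        else rows.dropLast ++ [rows.getLast! ++ [p.2]])
        ([] : List (List (List Char)))
    String.ofList (" = {\n".toList ++ indent ++
      List.intercalate (',' :: ' ' :: '\n' :: indent) (rows.map (List.intercalate [',', ' '])) ++
      "\n}".toList)

-- ===== PRECONDITION & SPEC =====
-- Pre_ excludes only inputs where A raises: nonempty data with elements_per_row = 0
-- (ZeroDivisionError from 'i % elements_per_row'); B raises there too.
def Pre_vector_initial_value (data : List Int) (elements_per_row : Int) (spaces : Int) : Prop :=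
  data = [] ∨ elements_per_row ≠ 0
instance (data : List Int) (elements_per_row : Int) (spaces : Int) : Decidable (Pre_vector_initial_value data elements_per_row spaces) := by unfold Pre_vector_initial_value; infer_instance

def pvWitness_vector_initial_value : List Int × Int × Int := ([0, 255, -1, 16], 3, 2)

def Spec_vector_initial_value (data : List Int) (elements_per_row : Int) (spaces : Int) (out : String) : Prop := out = vector_initial_value_alt data elements_per_row spaces
instance (data : List Int) (elements_per_row : Int) (spaces : Int) (out : String) : Decidable (Spec_vector_initial_value data elements_per_row spaces out) := by unfold Spec_vector_initial_value; infer_instance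

-- ===== CLAIM (what is proved, stated in full; the proofs are below) =====
def Claim_equal_vector_initial_value : Prop := ∀ (data : List Int) (elements_per_row : Int) (spaces : Int), Dom_vector_initial_value data elements_per_row spaces → Pre_vector_initial_value data elements_per_row spaces → Spec_vector_initial_value data elements_per_row spaces (vector_initial_value data elements_per_row spaces)

-- ===== LEMMAS AND PROOFS =====

-- rendering of B's row list: rows joined by ', \n'+indent, cells inside a row by ', '
def pvRender (indent : List Char) (rows : List (List (List Char))) : List Char :=
  List.intercalate (',' :: ' ' :: '\n' :: indent) (rows.map (List.intercalate [',', ' ']))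

theorem intercalate_cons2 {α : Type} (sep a b : List α) (l : List (List α)) :
    sep.intercalate (a :: b :: l) = a ++ sep ++ sep.intercalate (b :: l) := by
  simp [List.intercalate, List.intersperse]

theorem intercalate_singleton' {α : Type} (sep a : List α) :
    sep.intercalate [a] = a := by
  simp [List.intercalate, List.intersperse]

theorem intercalate_append_singleton {α : Type} (sep : List α) (xs : List (List α)) (y : List α)
    (h : xs ≠ []) :
    List.intercalate sep (xs ++ [y]) = List.intercalate sep xs ++ sep ++ y := by
  induction xs with
  | nil => exact absurd rfl h
  | cons a xs ih =>
    cases xs with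
    | nil => simp [intercalate_cons2, intercalate_singleton']
    | cons b xs =>
      have h' : sep.intercalate (b :: (xs ++ [y])) = sep.intercalate (b :: xs) ++ sep ++ y := by
        have := ih (by simp)
        simpa [List.append_assoc] using this
      rw [List.cons_append, List.cons_append, intercalate_cons2, h', intercalate_cons2]
      simp [List.append_assoc]

theorem pv_getLast!_concat {α : Type} [Inhabited α] (l : List α) (a : α) :
    (l ++ [a]).getLast! = a :=
  List.getLast!_of_getLast? (by simp)

theorem pvRender_append_row (indent : List Char) (rows : List (List (List Char))) (c : List Char)
    (h : rows ≠ []) :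
    pvRender indent (rows ++ [[c]]) =
      pvRender indent rows ++ [',', ' '] ++ '\n' :: indent ++ c := by
  unfold pvRender
  rw [List.map_append, List.map_singleton,
    intercalate_append_singleton _ _ _ (by simpa using h)]
  simp [intercalate_singleton', List.append_assoc]

theorem pvRender_extend_last (indent : List Char) (rows : List (List (List Char))) (c : List Char)
    (h : rows ≠ []) (h2 : rows.getLast! ≠ []) :
    pvRender indent (rows.dropLast ++ [rows.getLast! ++ [c]]) =
      pvRender indent rows ++ [',', ' '] ++ c := by
  rcases List.eq_nil_or_concat rows with rfl | ⟨l, a, rfl⟩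
  · exact absurd rfl h
  · simp only [List.concat_eq_append] at h2 ⊢
    have hl : (l ++ [a]).getLast! = a := pv_getLast!_concat l a
    have hd : (l ++ [a]).dropLast = l := List.dropLast_concat ..
    rw [hl, hd]
    have ha : a ≠ [] := by rw [hl] at h2; exact h2
    rcases l with _ | ⟨x, l⟩
    · simp only [List.nil_append]
      unfold pvRender
      simp only [List.map_singleton, intercalate_singleton']
      rw [intercalate_append_singleton _ _ _ ha]
    · unfold pvRender
      simp only [List.map_append, List.map_singleton]
      rw [intercalate_append_singleton _ (List.map (List.intercalate [',', ' ']) (x :: l))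
            (List.intercalate [',', ' '] (a ++ [c])) (by simp),
        intercalate_append_singleton _ (List.map (List.intercalate [',', ' ']) (x :: l))
            (List.intercalate [',', ' '] a) (by simp),
        intercalate_append_singleton _ a c ha]
      simp [List.append_assoc]

-- enumerate commutes with a map on the elements
theorem enumerate_map {α β : Type} (g : α → β) (xs : List α) (s : Int) :
    PySem.List.enumerate (xs.map g) s = (PySem.List.enumerate xs s).map (fun p => (p.1, g p.2)) := by
  induction xs generalizing s with
  | nil => simp [PySem.List.enumerate_nil]
  | cons x xs ih => simp [PySem.List.enumerate_cons, ih]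

theorem pv_mod_zero (epr : Int) : PySem.Int.mod 0 epr = 0 :=
  (PySem.Int.mod_eq_zero_iff_dvd 0 epr).mpr (dvd_zero epr)

-- A's streaming fold applies pvHex04 on the fly; the same fold over the pre-formatted cells
theorem pv_transport (epr : Int) (indent : List Char) (sz : Int) (data : List Int)
    (init : List Char) :
    (PySem.List.enumerate data 0).foldl
      (fun retval p =>
        let r1 := if PySem.Int.mod p.1 epr = 0 then retval ++ '\n' :: indent else retval
        let r2 := r1 ++ pvHex04 p.2
        if p.1 < sz - 1 then r2 ++ [',', ' '] else r2) init
    = (PySem.List.enumerate (data.map pvHex04) 0).foldl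
      (fun retval p =>
        let r1 := if PySem.Int.mod p.1 epr = 0 then retval ++ '\n' :: indent else retval
        let r2 := r1 ++ p.2
        if p.1 < sz - 1 then r2 ++ [',', ' '] else r2) init := by
  rw [enumerate_map, List.foldl_map]

-- the main simultaneous invariant: A's streaming fold, started just after a row break with the
-- already-produced text equal to the rendering of B's rows-so-far (plus the pending ', '),
-- ends in the rendering of B's final row list.
theorem pv_main (epr : Int) (indent : List Char) (n : Nat) :
    ∀ (cs : List (List Char)) (j : Nat) (rows : List (List (List Char))),
      rows ≠ [] → rows.getLast! ≠ [] → 1 ≤ j → j + cs.length = n →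
      (PySem.List.enumerate cs (j : Int)).foldl
        (fun retval p =>
          let r1 := if PySem.Int.mod p.1 epr = 0 then retval ++ '\n' :: indent else retval
          let r2 := r1 ++ p.2
          if p.1 < (n : Int) - 1 then r2 ++ [',', ' '] else r2)
        (" = {".toList ++ '\n' :: indent ++ pvRender indent rows ++
          (if j < n then [',', ' '] else []))
      = " = {".toList ++ '\n' :: indent ++
        pvRender indent
          ((PySem.List.enumerate cs (j : Int)).foldl
            (fun rows p =>
              if PySem.Int.mod p.1 epr = 0 then rows ++ [[p.2]]
              else rows.dropLast ++ [rows.getLast! ++ [p.2]]) rows) := by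
  intro cs
  induction cs with
  | nil =>
    intro j rows h1 h2 hj hn
    simp only [List.length_nil, Nat.add_zero] at hn
    have : ¬ j < n := by omega
    simp [PySem.List.enumerate_nil, this]
  | cons c cs ih =>
    intro j rows h1 h2 hj hn
    have hn' : j + (cs.length + 1) = n := by simpa using hn
    have hjn : j < n := by omega
    have hcast : (j : Int) + 1 = ((j + 1 : Nat) : Int) := by push_cast; ring
    rw [PySem.List.enumerate_cons, List.foldl_cons, List.foldl_cons, hcast]
    have hsz : ((j : Int) < (n : Int) - 1) ↔ (j + 1 < n) := by omega
    by_cases hbr : PySem.Int.mod (j : Int) epr = 0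
    · -- row break: B starts a new row [c]
      have hrow := pvRender_append_row indent rows c h1
      have step :
          (let r1 := if PySem.Int.mod ((j : Int), c).1 epr = 0 then
              (" = {".toList ++ '\n' :: indent ++ pvRender indent rows ++
                (if j < n then [',', ' '] else [])) ++ '\n' :: indent
            else (" = {".toList ++ '\n' :: indent ++ pvRender indent rows ++
                (if j < n then [',', ' '] else []));
           let r2 := r1 ++ ((j : Int), c).2
           if ((j : Int), c).1 < (n : Int) - 1 then r2 ++ [',', ' '] else r2)
          = " = {".toList ++ '\n' :: indent ++ pvRender indent (rows ++ [[c]]) ++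
              (if j + 1 < n then [',', ' '] else []) := by
        rw [hrow]
        by_cases hlt : j + 1 < n <;>
          simp [hbr, hjn, hsz, hlt, List.append_assoc]
      rw [step]
      have := ih (j + 1) (rows ++ [[c]]) (by simp)
        (by rw [pv_getLast!_concat]; simp)
        (by omega) (by omega)
      simpa [hbr] using this
    · -- continuation: B extends the last row
      have hrow := pvRender_extend_last indent rows c h1 h2
      have step :
          (let r1 := if PySem.Int.mod ((j : Int), c).1 epr = 0 then
              (" = {".toList ++ '\n' :: indent ++ pvRender indent rows ++
                (if j < n then [',', ' '] else [])) ++ '\n' :: indent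
            else (" = {".toList ++ '\n' :: indent ++ pvRender indent rows ++
                (if j < n then [',', ' '] else []));
           let r2 := r1 ++ ((j : Int), c).2
           if ((j : Int), c).1 < (n : Int) - 1 then r2 ++ [',', ' '] else r2)
          = " = {".toList ++ '\n' :: indent ++
              pvRender indent (rows.dropLast ++ [rows.getLast! ++ [c]]) ++
              (if j + 1 < n then [',', ' '] else []) := by
        rw [hrow]
        by_cases hlt : j + 1 < n <;>
          simp [hbr, hjn, hsz, hlt, List.append_assoc]
      rw [step]
      have := ih (j + 1) (rows.dropLast ++ [rows.getLast! ++ [c]]) (by simp)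
        (by rw [pv_getLast!_concat]; exact List.append_ne_nil_of_right_ne_nil _ (by simp))
        (by omega) (by omega)
      simpa [hbr] using this

-- ===== VERDICT (by name: the statement is the Claim_ definition above) =====
theorem vector_initial_value_spec : Claim_equal_vector_initial_value := by
  intro data epr spaces _hDom hPre
  unfold Spec_vector_initial_value
  rcases data with _ | ⟨d, ds⟩
  · have hA : vector_initial_value [] epr spaces = " = {\n}" := by
      simp [vector_initial_value, PySem.List.enumerate_nil]
    have hB : vector_initial_value_alt [] epr spaces = " = {\n}" := by
      simp [vector_initial_value_alt]
    rw [hA, hB]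
  · have hepr : epr ≠ 0 := by
      rcases hPre with h | h
      · exact absurd h (by simp)
      · exact h
    simp only [vector_initial_value, vector_initial_value_alt]
    rw [if_neg (show ¬ List.map pvHex04 (d :: ds) = [] by simp)]
    rw [pv_transport epr (List.replicate spaces.toNat ' ') (PySem.List.len (d :: ds)) (d :: ds)]
    have hsz : PySem.List.len (d :: ds) = ((d :: ds).length : Int) := by
      simp [PySem.List.len_eq]
    rw [hsz]
    simp only [List.map_cons]
    rw [PySem.List.enumerate_cons, List.foldl_cons, List.foldl_cons]
    have hmod0 : PySem.Int.mod ((0 : Int)) epr = 0 := pv_mod_zero epr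
    have hfirstB :
        ((if PySem.Int.mod ((0 : Int), pvHex04 d).1 epr = 0 then
            ([] : List (List (List Char))) ++ [[((0 : Int), pvHex04 d).2]]
          else ([] : List (List (List Char))).dropLast ++
            [([] : List (List (List Char))).getLast! ++ [((0 : Int), pvHex04 d).2]]))
          = [[pvHex04 d]] := by simp [hmod0]
    have hfirstA :
        (let r1 := if PySem.Int.mod ((0 : Int), pvHex04 d).1 epr = 0 then
            " = {".toList ++ '\n' :: List.replicate spaces.toNat ' ' else " = {".toList;
         let r2 := r1 ++ ((0 : Int), pvHex04 d).2
         if ((0 : Int), pvHex04 d).1 < (((d :: ds).length : Nat) : Int) - 1 then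
           r2 ++ [',', ' '] else r2)
        = " = {".toList ++ '\n' :: List.replicate spaces.toNat ' ' ++
            pvRender (List.replicate spaces.toNat ' ') [[pvHex04 d]] ++
            (if 1 < (d :: ds).length then [',', ' '] else []) := by
      by_cases hds : 0 < ds.length <;>
        simp [hmod0, hds, pvRender, intercalate_singleton', List.append_assoc]
    rw [hfirstB, hfirstA]
    have h01 : ((0 : Int) + 1) = ((1 : Nat) : Int) := by norm_num
    rw [h01]
    have key := pv_main epr (List.replicate spaces.toNat ' ') ((d :: ds).length)
      (ds.map pvHex04) 1 [[pvHex04 d]]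
      (by simp) (by simp [List.getLast!])
      (le_refl 1) (by simp [Nat.add_comm])
    rw [key]
    have e1 : (" = {\n".toList : List Char) = " = {".toList ++ ['\n'] := by decide
    have e2 : ("\n}".toList : List Char) = ['\n', '}'] := by decide
    simp [pvRender, e1, e2, List.append_assoc]
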